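-- pv_equiv track=rewrite | github.com/LURKS02/algorithm | algorithm/골드/골드3/2616.py | maxPassengers
-- ===== SOURCE A (Python) =====
-- def maxPassengers(N, train, trainLimit):
--     prefixSum = [0] * (N+1)
--     for i in range(1, N+1):
--         prefixSum[i] = prefixSum[i-1] + train[i-1]
--
--     # dp[i][j] = i대의 소형 기관차로 j번째 객체까지 고려했을 때 운송할 수 있는 최대 손님 수
--     dp = [[0] * (N + 1) for _ in range(4)]
--
--     for i in range(1, 4):
--         for j in range(i * trainLimit, N + 1):
--             passengers = prefixSum[j] - prefixSum[j - trainLimit]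
--             dp[i][j] = max(dp[i][j-1], dp[i-1][j-trainLimit] + passengers)
--
--     return dp[3][N]
-- ===== SOURCE B (Python) =====
-- def maxPassengers(N, train, trainLimit):
--     t = trainLimit
--     prefix = [0]
--     for x in train[:N]:
--         prefix.append(prefix[-1] + x)
--
--     def level(i):
--         # row of best totals using i trains over the first j cars, for j = 0..N
--         if i == 0:
--             return [0] * (N + 1)
--         prev = level(i - 1)
--         row = []
--         run = 0
--         for j in range(N + 1):
--             if j >= i * t:
--                 run = max(run, prev[j - t] + prefix[j] - prefix[j - t])
--                 row.append(run)
--             else: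
--                 row.append(0)  # i trains of t cars cannot fit in j cars
--         return row
--
--     return level(3)[N]
-- ===== Notes on version B (the rewrite author's own statement) =====
-- stated objective: alternative
-- what changed: Replaces A's in-place 4x(N+1) DP table filled by nested index loops and element assignment with a depth-3 recursion over the number of trains, where each level's row is built functionally from the previous level by a single scan carrying a running maximum (no 2-D table, no index writes).
import Mathlib
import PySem

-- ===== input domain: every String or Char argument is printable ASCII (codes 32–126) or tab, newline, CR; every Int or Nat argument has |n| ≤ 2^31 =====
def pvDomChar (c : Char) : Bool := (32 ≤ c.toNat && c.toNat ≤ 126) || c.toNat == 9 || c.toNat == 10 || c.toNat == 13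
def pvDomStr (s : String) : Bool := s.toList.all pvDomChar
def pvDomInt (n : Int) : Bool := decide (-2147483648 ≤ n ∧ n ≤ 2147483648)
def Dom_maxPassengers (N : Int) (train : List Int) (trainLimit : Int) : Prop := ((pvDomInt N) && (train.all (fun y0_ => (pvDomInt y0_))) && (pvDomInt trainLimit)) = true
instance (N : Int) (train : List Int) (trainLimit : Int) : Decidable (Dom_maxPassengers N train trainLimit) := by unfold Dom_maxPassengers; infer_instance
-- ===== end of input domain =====

-- B replaces A's in-place 4×(N+1) DP table with nested index loops by a depth-3 recursion
-- over the number of trains, each level a functional scan with a running max (alternative).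

-- ===== PORT A =====
def maxPassengers (N : Int) (train : List Int) (trainLimit : Int) : Int :=
  -- prefixSum = [0] * (N+1); for i in range(1, N+1): prefixSum[i] = prefixSum[i-1] + train[i-1]
  let prefixSum : List Int :=
    (PySem.List.pyRange 1 (N + 1) 1).foldl
      (fun ps i =>
        PySem.List.pySetD ps i
          (PySem.List.pyGetD ps (i - 1) 0 + PySem.List.pyGetD train (i - 1) 0))
      (List.replicate (N + 1).toNat 0)
  -- dp = [[0]*(N+1) for _ in range(4)]
  let dpInit : List (List Int) := List.replicate 4 (List.replicate (N + 1).toNat 0)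
  -- for i in range(1, 4): for j in range(i*trainLimit, N+1): dp[i][j] = max(dp[i][j-1], dp[i-1][j-trainLimit] + passengers)
  let dp : List (List Int) :=
    (PySem.List.pyRange 1 4 1).foldl
      (fun dp i =>
        (PySem.List.pyRange (i * trainLimit) (N + 1) 1).foldl
          (fun dp j =>
            let passengers :=
              PySem.List.pyGetD prefixSum j 0 - PySem.List.pyGetD prefixSum (j - trainLimit) 0
            let row := PySem.List.pyGetD dp i []
            let v :=
              max (PySem.List.pyGetD row (j - 1) 0)
                  (PySem.List.pyGetD (PySem.List.pyGetD dp (i - 1) []) (j - trainLimit) 0 + passengers)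
            PySem.List.pySetD dp i (PySem.List.pySetD row j v))
          dp)
      dpInit
  PySem.List.pyGetD (PySem.List.pyGetD dp 3 []) N 0

-- ===== PORT B =====
-- prefix = [0]; for x in train[:N]: prefix.append(prefix[-1] + x)
def pvPrefixB (N : Int) (train : List Int) : List Int :=
  (PySem.List.slice train none (some N)).foldl
    (fun ps x => ps ++ [PySem.List.pyGetD ps (-1) 0 + x]) [0]

-- level(i): row of best totals using i trains over the first j cars (j = 0..N),
-- built with a running max; recursion over the number of trains only (depth 3)
def pvLevel (N : Int) (t : Int) (pfx : List Int) : Nat → List Int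
  | 0 => List.replicate (N + 1).toNat 0
  | i + 1 =>
    let prev := pvLevel N t pfx i
    ((PySem.List.pyRange 0 (N + 1) 1).foldl
      (fun st j =>
        if ((i : Int) + 1) * t ≤ j then
          let run := max st.2 (PySem.List.pyGetD prev (j - t) 0
            + (PySem.List.pyGetD pfx j 0 - PySem.List.pyGetD pfx (j - t) 0))
          (st.1 ++ [run], run)
        else (st.1 ++ [0], st.2))
      (([] : List Int), (0 : Int))).1

def maxPassengers_alt (N : Int) (train : List Int) (trainLimit : Int) : Int :=
  PySem.List.pyGetD (pvLevel N trainLimit (pvPrefixB N train) 3) N 0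

-- ===== PRECONDITION & SPEC =====
-- Pre_ is exactly the set of inputs on which A returns: outside it (N < 0, N > len(train),
-- or trainLimit < 0) the Python A raises IndexError.
def Pre_maxPassengers (N : Int) (train : List Int) (trainLimit : Int) : Prop :=
  0 ≤ N ∧ N ≤ (train.length : Int) ∧ 0 ≤ trainLimit
instance (N : Int) (train : List Int) (trainLimit : Int) : Decidable (Pre_maxPassengers N train trainLimit) := by unfold Pre_maxPassengers; infer_instance
def pvWitness_maxPassengers : Int × List Int × Int := (2, [3, 4], 1)

def Spec_maxPassengers (N : Int) (train : List Int) (trainLimit : Int) (out : Int) : Prop := out = maxPassengers_alt N train trainLimit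
instance (N : Int) (train : List Int) (trainLimit : Int) (out : Int) : Decidable (Spec_maxPassengers N train trainLimit out) := by unfold Spec_maxPassengers; infer_instance

-- ===== CLAIM (what is proved, stated in full; the proofs are below) =====
def Claim_equal_maxPassengers : Prop := ∀ (N : Int) (train : List Int) (trainLimit : Int), Dom_maxPassengers N train trainLimit → Pre_maxPassengers N train trainLimit → Spec_maxPassengers N train trainLimit (maxPassengers N train trainLimit)

-- ===== LEMMAS AND PROOFS =====

-- proof device: the top-down value recurrence both programs compute — solve(i, j) =
-- best passengers using i trains over the first j cars (0 when infeasible)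
def pvSolve (pfx : List Int) (trainLimit : Int) (i : Nat) (j : Int) : Int :=
  match i with
  | 0 => 0
  | i' + 1 =>
    if j < ((i' : Int) + 1) * trainLimit ∨ j < 0 then 0
    else
      max (pvSolve pfx trainLimit (i' + 1) (j - 1))
          (pvSolve pfx trainLimit i' (j - trainLimit)
            + (PySem.List.pyGetD pfx j 0 - PySem.List.pyGetD pfx (j - trainLimit) 0))
termination_by (i, (j + 1).toNat)
decreasing_by
  · apply Prod.Lex.right; omega
  · apply Prod.Lex.left; omega

theorem pvGetD_nonneg {α : Type} [Inhabited α] (xs : List α) (i : Int) (d : α) (h : 0 ≤ i) :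
    PySem.List.pyGetD xs i d = xs.getD i.toNat d := by
  rw [← Int.toNat_of_nonneg h, PySem.List.pyGetD_natCast, Int.toNat_natCast]

theorem pvGetD_set {α : Type} (xs : List α) (p m : Nat) (v d : α) :
    (xs.set p v).getD m d = if m = p ∧ p < xs.length then v else xs.getD m d := by
  simp [List.getD, List.getElem?_set]
  split_ifs with h1 h2 h3 <;> simp_all

-- sum of the first k elements (Python's prefixSum[k])
def pvS (t : List Int) (k : Nat) : Int := (t.take k).sum

def pvScan (s : Int) : List Int → List Int
  | [] => []
  | x :: l => (s + x) :: pvScan (s + x) l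

theorem pvB1 (l : List Int) : ∀ (ps : List Int), ps ≠ [] →
    l.foldl (fun ps x => ps ++ [PySem.List.pyGetD ps (-1) 0 + x]) ps
      = ps ++ pvScan (PySem.List.pyGetD ps (-1) 0) l := by
  induction l with
  | nil => intro ps h; simp [pvScan]
  | cons x l ih =>
    intro ps h
    simp only [List.foldl_cons]
    rw [ih (ps ++ [PySem.List.pyGetD ps (-1) 0 + x]) (by simp),
      PySem.List.pyGetD_neg_one_append_singleton]
    simp [pvScan]

theorem pvB2 (l : List Int) : ∀ (s : Int) (m : Nat), m ≤ l.length →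
    (s :: pvScan s l).getD m 0 = s + pvS l m := by
  induction l with
  | nil =>
    intro s m hm
    simp only [List.length_nil, Nat.le_zero] at hm
    subst hm
    simp [pvS]
  | cons x l ih =>
    intro s m hm
    cases m with
    | zero => simp [pvS]
    | succ m =>
      have := ih (s + x) m (by simpa using hm)
      simp only [pvScan, List.getD_cons_succ] at this ⊢
      rw [this]
      simp [pvS, List.take_succ_cons]
      ring

theorem pvPrefixB_eq (N : Int) (train : List Int) (h0 : 0 ≤ N) :
    pvPrefixB N train = 0 :: pvScan 0 (train.take N.toNat) := by
  unfold pvPrefixB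
  rw [PySem.List.slice_to train h0, pvB1 _ [0] (by simp)]
  norm_num [PySem.List.pyGetD]
  congr 1

theorem pvPrefixB_getD (N : Int) (train : List Int) (h0 : 0 ≤ N) (h1 : N ≤ (train.length : Int))
    (m : Nat) (hm : m ≤ N.toNat) :
    (pvPrefixB N train).getD m 0 = pvS train m := by
  rw [pvPrefixB_eq N train h0,
    pvB2 _ 0 m (by rw [List.length_take]; omega)]
  simp only [pvS, List.take_take]
  rw [min_eq_left hm]
  ring

theorem pvS_succ (t : List Int) (k : Nat) (hk : k < t.length) :
    pvS t (k + 1) = pvS t k + t.getD k 0 := by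
  simp only [pvS, List.sum_take_succ t k hk, List.getD_eq_getElem t 0 hk]

theorem pvPrefixA (N : Int) (train : List Int) (h0 : 0 ≤ N) (h1 : N ≤ (train.length : Int)) :
    ∀ k : Nat, k ≤ N.toNat →
      ((PySem.List.pyRange 1 ((k : Int) + 1) 1).foldl
        (fun ps i => PySem.List.pySetD ps i
          (PySem.List.pyGetD ps (i - 1) 0 + PySem.List.pyGetD train (i - 1) 0))
        (List.replicate (N + 1).toNat 0)).length = N.toNat + 1 ∧
      ∀ m : Nat, m ≤ N.toNat →
        ((PySem.List.pyRange 1 ((k : Int) + 1) 1).foldl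
          (fun ps i => PySem.List.pySetD ps i
            (PySem.List.pyGetD ps (i - 1) 0 + PySem.List.pyGetD train (i - 1) 0))
          (List.replicate (N + 1).toNat 0)).getD m 0 = if m ≤ k then pvS train m else 0 := by
  intro k
  induction k with
  | zero =>
    intro _
    rw [PySem.List.pyRange_one_eq_nil (by norm_num)]
    constructor
    · simp; omega
    · intro m hm
      rcases Nat.eq_zero_or_pos m with rfl | hpos
      · simp [pvS]
      · simp
        omega
  | succ k ih =>
    intro hk
    obtain ⟨ihlen, ihent⟩ := ih (by omega)
    have hcast : ((k + 1 : Nat) : Int) + 1 = ((k : Int) + 1) + 1 := by push_cast; ring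
    rw [hcast, PySem.List.pyRange_one_succ_right (by omega), List.foldl_append]
    set res := (PySem.List.pyRange 1 ((k : Int) + 1) 1).foldl
      (fun ps i => PySem.List.pySetD ps i
        (PySem.List.pyGetD ps (i - 1) 0 + PySem.List.pyGetD train (i - 1) 0))
      (List.replicate (N + 1).toNat 0) with hres
    simp only [List.foldl_cons, List.foldl_nil]
    have e1 : (k : Int) + 1 - 1 = ((k : Nat) : Int) := by ring
    have e2 : (k : Int) + 1 = ((k + 1 : Nat) : Int) := by push_cast; ring
    rw [e1, e2, PySem.List.pyGetD_natCast, PySem.List.pyGetD_natCast, PySem.List.pySetD_natCast]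
    have hklen : k < train.length := by omega
    have hv : res.getD k 0 + train.getD k 0 = pvS train (k + 1) := by
      rw [ihent k (by omega), if_pos (le_refl k), pvS_succ train k hklen]
    constructor
    · rw [List.length_set, ihlen]
    · intro m hm
      rw [pvGetD_set]
      by_cases hmk : m = k + 1
      · rw [if_pos ⟨hmk, by omega⟩, hv, if_pos (by omega), hmk]
      · rw [if_neg (by tauto), ihent m hm]
        have : (m ≤ k) ↔ (m ≤ k + 1) := by omega
        simp only [this]

theorem pvSolve_guard (pfx : List Int) (tl : Int) (i : Nat) (j : Int)
    (h : j < (i : Int) * tl ∨ j < 0) : pvSolve pfx tl i j = 0 := by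
  match i with
  | 0 => rw [pvSolve]
  | i' + 1 =>
    rw [pvSolve, if_pos]
    push_cast at h
    exact h

-- the A-side loop step and loop, named for the proofs (defeq to the lambdas in maxPassengers)
def pvStepA (pa : List Int) (tl : Int) (i : Int) : List (List Int) → Int → List (List Int) :=
  fun dp j =>
    let passengers := PySem.List.pyGetD pa j 0 - PySem.List.pyGetD pa (j - tl) 0
    let row := PySem.List.pyGetD dp i []
    let v := max (PySem.List.pyGetD row (j - 1) 0)
      (PySem.List.pyGetD (PySem.List.pyGetD dp (i - 1) []) (j - tl) 0 + passengers)
    PySem.List.pySetD dp i (PySem.List.pySetD row j v)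

def pvFoldA (pa : List Int) (tl : Int) (i : Nat) (dp0 : List (List Int)) (b : Int) : List (List Int) :=
  (PySem.List.pyRange ((i : Int) * tl) b 1).foldl (pvStepA pa tl (i : Int)) dp0

-- the inner 'for j in range(i*trainLimit, ...)' loop invariant; pa abstracts A's prefix list
theorem pvInner (N : Int) (train : List Int) (tl : Int)
    (h0 : 0 ≤ N) (_h1 : N ≤ (train.length : Int)) (h2 : 0 ≤ tl)
    (pa : List Int)
    (hpa : ∀ j : Int, 0 ≤ j → j ≤ N → PySem.List.pyGetD pa j 0 = PySem.List.pyGetD (pvPrefixB N train) j 0)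
    (i : Nat) (hi1 : 1 ≤ i)
    (dp0 : List (List Int)) (hlen : dp0.length = 4) (hi3 : i < 4)
    (hprev : ∀ m : Nat, m ≤ N.toNat →
      (dp0.getD (i - 1) []).getD m 0 = pvSolve (pvPrefixB N train) tl (i - 1) (m : Int))
    (hrow : dp0.getD i [] = List.replicate (N.toNat + 1) 0) :
    ∀ k : Nat, (i : Int) * tl + k ≤ N + 1 →
    (pvFoldA pa tl i dp0 ((i : Int) * tl + k)).length = 4 ∧
    (∀ i' : Nat, i' ≠ i → (pvFoldA pa tl i dp0 ((i : Int) * tl + k)).getD i' [] = dp0.getD i' []) ∧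
    ((pvFoldA pa tl i dp0 ((i : Int) * tl + k)).getD i []).length = N.toNat + 1 ∧
    (∀ m : Nat, m ≤ N.toNat →
      ((pvFoldA pa tl i dp0 ((i : Int) * tl + k)).getD i []).getD m 0 =
        if (m : Int) < (i : Int) * tl + k then pvSolve (pvPrefixB N train) tl i (m : Int) else 0) := by
  have ha : 0 ≤ (i : Int) * tl := mul_nonneg (by positivity) h2
  have htl : tl ≤ (i : Int) * tl := le_mul_of_one_le_left h2 (by exact_mod_cast hi1)
  intro k
  induction k with
  | zero =>
    intro _
    unfold pvFoldA
    rw [show (i : Int) * tl + ((0 : Nat) : Int) = (i : Int) * tl by push_cast; ring,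
      PySem.List.pyRange_one_eq_nil (le_refl _), List.foldl_nil]
    refine ⟨hlen, fun _ _ => rfl, by rw [hrow]; exact List.length_replicate, fun m hm => ?_⟩
    rw [hrow]
    simp only [List.getD_eq_getElem?_getD, List.getElem?_getD_replicate_default_eq]
    split_ifs with hcond
    · exact (pvSolve_guard _ _ _ _ (Or.inl hcond)).symm
    · rfl
  | succ k ih =>
    intro hk
    obtain ⟨len4, hunch, hrlen, hent⟩ := ih (by omega)
    set a := (i : Int) * tl with hadef
    set dpk := pvFoldA pa tl i dp0 (a + k) with hdpk
    have hsplit : pvFoldA pa tl i dp0 (a + ((k + 1 : Nat) : Int)) = pvStepA pa tl (i : Int) dpk (a + k) := by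
      unfold pvFoldA
      rw [show a + ((k + 1 : Nat) : Int) = (a + (k : Nat)) + 1 by push_cast; ring,
        PySem.List.pyRange_one_succ_right (by omega), List.foldl_append, List.foldl_cons, List.foldl_nil]
      rfl
    set j : Int := a + k with hjdef
    have hj0 : 0 ≤ j := by omega
    have hjN : j ≤ N := by omega
    -- the read of dp[i][j-1]
    have hrow_ne : dpk.getD i [] ≠ [] := by
      intro hnil; rw [hnil] at hrlen; simp at hrlen
    have hread1 : PySem.List.pyGetD (dpk.getD i []) (j - 1) 0 = pvSolve (pvPrefixB N train) tl i (j - 1) := by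
      by_cases hjpos : 0 < j
      · rw [pvGetD_nonneg _ _ _ (by omega)]
        have hmn : (j - 1).toNat ≤ N.toNat := by omega
        rw [hent _ hmn, if_pos (by omega)]
        congr 1
        omega
      · have hj : j = 0 := by omega
        have hae : a = 0 := by omega
        rw [hj, show (0 : Int) - 1 = -1 by ring, PySem.List.pyGetD_neg_one _ _ hrow_ne,
          List.getLast_eq_getElem]
        have hNlt : N.toNat < (dpk.getD i []).length := by omega
        rw [← List.getD_eq_getElem (dpk.getD i []) 0 (by omega)]
        have := hent N.toNat (le_refl _)
        rw [show (dpk.getD i []).length - 1 = N.toNat by omega, this, if_neg (by omega)]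
        exact (pvSolve_guard _ _ _ _ (Or.inr (by omega))).symm
    -- the read of dp[i-1][j - tl]
    have hjt0 : 0 ≤ j - tl := by omega
    have hjtN : j - tl ≤ N := by omega
    have hread2 : PySem.List.pyGetD (dpk.getD ((i : Nat) - 1) []) (j - tl) 0
        = pvSolve (pvPrefixB N train) tl (i - 1) (j - tl) := by
      rw [hunch (i - 1) (by omega), pvGetD_nonneg _ _ _ hjt0,
        hprev (j - tl).toNat (by omega)]
      congr 1
      omega
    -- the written value is solve(i, j)
    obtain ⟨i', rfl⟩ : ∃ i', i = i' + 1 := ⟨i - 1, by omega⟩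
    simp only [Nat.add_sub_cancel] at hread2
    have hv : max (PySem.List.pyGetD (dpk.getD (i' + 1) []) (j - 1) 0)
        (PySem.List.pyGetD (dpk.getD i' []) (j - tl) 0
          + (PySem.List.pyGetD pa j 0 - PySem.List.pyGetD pa (j - tl) 0))
        = pvSolve (pvPrefixB N train) tl (i' + 1) j := by
      rw [hread1, hread2, hpa j hj0 hjN, hpa (j - tl) hjt0 hjtN]
      conv_rhs => rw [pvSolve]
      rw [if_neg (by push_cast at hadef ⊢; omega)]
    have hstep : pvStepA pa tl ((i' + 1 : Nat) : Int) dpk j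
        = dpk.set (i' + 1) ((dpk.getD (i' + 1) []).set j.toNat (pvSolve (pvPrefixB N train) tl (i' + 1) j)) := by
      unfold pvStepA
      rw [show ((i' + 1 : Nat) : Int) - 1 = ((i' : Nat) : Int) by push_cast; ring]
      simp only [PySem.List.pyGetD_natCast]
      rw [PySem.List.pySetD_of_nonneg _ _ hj0, PySem.List.pySetD_natCast, hv]
    rw [hsplit, hstep]
    have hjlt : j.toNat < (dpk.getD (i' + 1) []).length := by omega
    have hset_len : (dpk.set (i' + 1) ((dpk.getD (i' + 1) []).set j.toNat
        (pvSolve (pvPrefixB N train) tl (i' + 1) j))).length = 4 := by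
      rw [List.length_set]; exact len4
    have hgetset : ∀ (r : List Int), (dpk.set (i' + 1) r).getD (i' + 1) [] = r := by
      intro r
      rw [pvGetD_set, if_pos ⟨rfl, by omega⟩]
    have hgetset' : ∀ (r : List Int) (i'' : Nat), i'' ≠ i' + 1 →
        (dpk.set (i' + 1) r).getD i'' [] = dpk.getD i'' [] := by
      intro r i'' hne
      rw [pvGetD_set, if_neg (by tauto)]
    refine ⟨hset_len, ?_, ?_, ?_⟩
    · intro i'' hne
      rw [hgetset' _ _ hne, hunch _ hne]
    · rw [hgetset, List.length_set]; exact hrlen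
    · intro m hm
      rw [hgetset, pvGetD_set]
      by_cases hmj : m = j.toNat
      · rw [if_pos ⟨hmj, hjlt⟩, if_pos (by omega)]
        congr 1
        omega
      · rw [if_neg (by tauto), hent m hm]
        rw [show a + ((k + 1 : Nat) : Int) = j + 1 by push_cast; omega]
        have hiff : ((m : Int) < j) ↔ ((m : Int) < j + 1) := by omega
        simp only [hiff]

-- a full outer iteration: row i becomes solve(i, ·) for every index up to N
theorem pvOuter (N : Int) (train : List Int) (tl : Int)
    (h0 : 0 ≤ N) (h1 : N ≤ (train.length : Int)) (h2 : 0 ≤ tl)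
    (pa : List Int)
    (hpa : ∀ j : Int, 0 ≤ j → j ≤ N → PySem.List.pyGetD pa j 0 = PySem.List.pyGetD (pvPrefixB N train) j 0)
    (i : Nat) (hi1 : 1 ≤ i)
    (dp0 : List (List Int)) (hlen : dp0.length = 4) (hi3 : i < 4)
    (hprev : ∀ m : Nat, m ≤ N.toNat →
      (dp0.getD (i - 1) []).getD m 0 = pvSolve (pvPrefixB N train) tl (i - 1) (m : Int))
    (hrow : dp0.getD i [] = List.replicate (N.toNat + 1) 0) :
    (pvFoldA pa tl i dp0 (N + 1)).length = 4 ∧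
    (∀ i' : Nat, i' ≠ i → (pvFoldA pa tl i dp0 (N + 1)).getD i' [] = dp0.getD i' []) ∧
    (∀ m : Nat, m ≤ N.toNat →
      ((pvFoldA pa tl i dp0 (N + 1)).getD i []).getD m 0 = pvSolve (pvPrefixB N train) tl i (m : Int)) := by
  have ha : 0 ≤ (i : Int) * tl := mul_nonneg (by positivity) h2
  by_cases hfe : (i : Int) * tl ≤ N + 1
  · have hb : N + 1 = (i : Int) * tl + ((N + 1 - (i : Int) * tl).toNat : Int) := by omega
    obtain ⟨c1, c2, _, c4⟩ := pvInner N train tl h0 h1 h2 pa hpa i hi1 dp0 hlen hi3 hprev hrow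
      (N + 1 - (i : Int) * tl).toNat (by omega)
    rw [hb]
    refine ⟨c1, c2, fun m hm => ?_⟩
    rw [c4 m hm, if_pos (by omega)]
  · unfold pvFoldA
    rw [PySem.List.pyRange_one_eq_nil (by omega), List.foldl_nil]
    refine ⟨hlen, fun _ _ => rfl, fun m hm => ?_⟩
    rw [hrow]
    simp only [List.getD_eq_getElem?_getD, List.getElem?_getD_replicate_default_eq]
    exact (pvSolve_guard _ _ _ _ (Or.inl (by omega))).symm

-- ===== VERDICT (by name: the statement is the Claim_ definition above) =====
theorem pvSolve_zero (pfx : List Int) (tl : Int) (j : Int) : pvSolve pfx tl 0 j = 0 := by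
  rw [pvSolve]

-- one level of B's recursion: the row scan produces exactly the solve(i'+1, ·) values
theorem pvLevelRow (N : Int) (train : List Int) (tl : Int)
    (_h0 : 0 ≤ N) (_h1 : N ≤ (train.length : Int)) (h2 : 0 ≤ tl) (i' : Nat)
    (hprev : ∀ m : Nat, m ≤ N.toNat →
      (pvLevel N tl (pvPrefixB N train) i').getD m 0 = pvSolve (pvPrefixB N train) tl i' (m : Int)) :
    ∀ k : Nat, k ≤ N.toNat + 1 →
      ((PySem.List.pyRange 0 (k : Int) 1).foldl
        (fun st j =>
          if ((i' : Int) + 1) * tl ≤ j then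
            let run := max st.2 (PySem.List.pyGetD (pvLevel N tl (pvPrefixB N train) i') (j - tl) 0
              + (PySem.List.pyGetD (pvPrefixB N train) j 0 - PySem.List.pyGetD (pvPrefixB N train) (j - tl) 0))
            (st.1 ++ [run], run)
          else (st.1 ++ [0], st.2))
        (([] : List Int), (0 : Int)))
      = ((List.range k).map (fun (m : Nat) => pvSolve (pvPrefixB N train) tl (i' + 1) (m : Int)),
         pvSolve (pvPrefixB N train) tl (i' + 1) ((k : Int) - 1)) := by
  have htl : tl ≤ ((i' : Int) + 1) * tl := le_mul_of_one_le_left h2 (by omega)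
  intro k
  induction k with
  | zero =>
    intro _
    rw [show ((0 : Nat) : Int) = 0 from rfl, PySem.List.pyRange_one_eq_nil (le_refl _),
      List.foldl_nil, pvSolve_guard _ _ _ _ (Or.inr (by norm_num))]
    simp
  | succ k ih =>
    intro hk
    rw [show ((k + 1 : Nat) : Int) = (k : Int) + 1 from by push_cast; ring,
      PySem.List.pyRange_one_succ_right (by omega), List.foldl_append, List.foldl_cons,
      List.foldl_nil, ih (by omega)]
    simp only []
    by_cases hc : ((i' : Int) + 1) * tl ≤ (k : Int)
    · rw [if_pos hc]
      have hread : PySem.List.pyGetD (pvLevel N tl (pvPrefixB N train) i') ((k : Int) - tl) 0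
          = pvSolve (pvPrefixB N train) tl i' ((k : Int) - tl) := by
        rw [pvGetD_nonneg _ _ _ (by omega), hprev ((k : Int) - tl).toNat (by omega)]
        congr 1
        omega
      have hrun : max (pvSolve (pvPrefixB N train) tl (i' + 1) ((k : Int) - 1))
          (PySem.List.pyGetD (pvLevel N tl (pvPrefixB N train) i') ((k : Int) - tl) 0
            + (PySem.List.pyGetD (pvPrefixB N train) (k : Int) 0
              - PySem.List.pyGetD (pvPrefixB N train) ((k : Int) - tl) 0))
          = pvSolve (pvPrefixB N train) tl (i' + 1) (k : Int) := by
        rw [hread]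
        conv_rhs => rw [pvSolve]
        rw [if_neg (by omega)]
      rw [hrun]
      simp only [Prod.mk.injEq]
      constructor
      · rw [List.range_succ, List.map_append]
        rfl
      · congr 1
        omega

    · rw [if_neg hc]
      simp only [Prod.mk.injEq]
      constructor
      · rw [List.range_succ, List.map_append]
        simp only [List.map_cons, List.map_nil]
        rw [pvSolve_guard _ _ _ _ (Or.inl (by push_cast; omega))]
      · rw [pvSolve_guard _ _ _ _ (by push_cast; omega),
          pvSolve_guard _ _ _ _ (by push_cast; omega)]

theorem pvLevel_getD (N : Int) (train : List Int) (tl : Int)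
    (h0 : 0 ≤ N) (h1 : N ≤ (train.length : Int)) (h2 : 0 ≤ tl) :
    ∀ (i : Nat) (m : Nat), m ≤ N.toNat →
      (pvLevel N tl (pvPrefixB N train) i).getD m 0 = pvSolve (pvPrefixB N train) tl i (m : Int) := by
  intro i
  induction i with
  | zero =>
    intro m hm
    rw [pvSolve_zero]
    simp only [pvLevel, List.getD_eq_getElem?_getD, List.getElem?_getD_replicate_default_eq]
  | succ i' ih =>
    intro m hm
    have heq := pvLevelRow N train tl h0 h1 h2 i' ih (N.toNat + 1) (le_refl _)
    simp only [pvLevel]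
    rw [show (N + 1 : Int) = ((N.toNat + 1 : Nat) : Int) from by omega, heq]
    rw [List.getD_eq_getElem?_getD, List.getElem?_map, List.getElem?_range (by omega)]
    rfl

theorem maxPassengers_spec : Claim_equal_maxPassengers := by
  unfold Claim_equal_maxPassengers
  intro N train tl _ hpre
  obtain ⟨h0, h1, h2⟩ := hpre
  have hN : ((N.toNat : Int)) = N := Int.toNat_of_nonneg h0
  unfold Spec_maxPassengers maxPassengers
  simp only []
  rw [show (N + 1).toNat = N.toNat + 1 from by omega]
  rw [show PySem.List.pyRange 1 4 1 = [1, 2, 3] from by decide]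
  set zrow : List Int := List.replicate (N.toNat + 1) 0 with hzrow
  set dpI : List (List Int) := List.replicate 4 zrow with hdpI
  set pa := (PySem.List.pyRange 1 (N + 1) 1).foldl
      (fun ps i => PySem.List.pySetD ps i
        (PySem.List.pyGetD ps (i - 1) 0 + PySem.List.pyGetD train (i - 1) 0))
      (List.replicate (N.toNat + 1) 0) with hpadef
  simp only [List.foldl_cons, List.foldl_nil]
  -- A's prefix list agrees with B's
  have hpaeq : ∀ j : Int, 0 ≤ j → j ≤ N → PySem.List.pyGetD pa j 0 = PySem.List.pyGetD (pvPrefixB N train) j 0 := by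
    intro j hj hjN
    obtain ⟨palen, paent⟩ := pvPrefixA N train h0 h1 N.toNat (le_refl _)
    rw [hN] at paent
    rw [pvGetD_nonneg _ _ _ hj, pvGetD_nonneg _ _ _ hj, hpadef]
    rw [show List.replicate (N.toNat + 1) (0 : Int) = List.replicate (N + 1).toNat 0 from by congr 1; omega]
    rw [paent j.toNat (by omega), if_pos (by omega),
      pvPrefixB_getD N train h0 h1 j.toNat (by omega)]
  have hzI : ∀ i : Nat, i < 4 → dpI.getD i [] = zrow := by
    intro i hi
    rw [hdpI, List.getD_eq_getElem?_getD, List.getElem?_replicate_of_lt hi]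
    rfl
  have hzent : ∀ m : Nat, m ≤ N.toNat → zrow.getD m 0 = 0 := by
    intro m hm
    rw [hzrow]
    simp only [List.getD_eq_getElem?_getD, List.getElem?_getD_replicate_default_eq]
  have hB : maxPassengers_alt N train tl = pvSolve (pvPrefixB N train) tl 3 N := by
    unfold maxPassengers_alt
    rw [pvGetD_nonneg _ _ _ h0, pvLevel_getD N train tl h0 h1 h2 3 N.toNat (le_refl _), hN]
  rw [hB]
  change PySem.List.pyGetD (PySem.List.pyGetD
      (pvFoldA pa tl 3 (pvFoldA pa tl 2 (pvFoldA pa tl 1 dpI (N + 1)) (N + 1)) (N + 1)) 3 []) N 0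
    = pvSolve (pvPrefixB N train) tl 3 N
  obtain ⟨l1, u1, e1⟩ := pvOuter N train tl h0 h1 h2 pa hpaeq 1 (le_refl _) dpI
    (by rw [hdpI]; exact List.length_replicate) (by norm_num)
    (by intro m hm
        rw [show (1 : Nat) - 1 = 0 from rfl, hzI 0 (by norm_num), hzent m hm, pvSolve_zero])
    (hzI 1 (by norm_num))
  obtain ⟨l2, u2, e2⟩ := pvOuter N train tl h0 h1 h2 pa hpaeq 2 (by norm_num)
    (pvFoldA pa tl 1 dpI (N + 1)) l1 (by norm_num)
    (by intro m hm
        rw [show (2 : Nat) - 1 = 1 from rfl]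
        exact e1 m hm)
    (by rw [u1 2 (by norm_num)]; exact hzI 2 (by norm_num))
  obtain ⟨l3, u3, e3⟩ := pvOuter N train tl h0 h1 h2 pa hpaeq 3 (by norm_num)
    (pvFoldA pa tl 2 (pvFoldA pa tl 1 dpI (N + 1)) (N + 1)) l2 (by norm_num)
    (by intro m hm
        rw [show (3 : Nat) - 1 = 2 from rfl]
        exact e2 m hm)
    (by rw [u2 3 (by norm_num), u1 3 (by norm_num)]; exact hzI 3 (by norm_num))
  rw [show (3 : Int) = ((3 : Nat) : Int) from by norm_num, PySem.List.pyGetD_natCast,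
    pvGetD_nonneg _ _ _ h0, e3 N.toNat (le_refl _), hN]
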